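-- pv_equiv track=rewrite | github.com/Desipeli/adventofcode2023 | day7_2.py | translate_jokers
-- ===== SOURCE A (Python) =====
-- def get_card_count(hand):
--     hand_dict = {}
--     for card in hand:
--         if card not in hand_dict:
--             hand_dict[card] = 0
--         hand_dict[card] += 1
--     return hand_dict
--
-- def translate_jokers(hand):
--     cards = get_card_count(hand)
--     # most cards
--     card_count_sorted = sorted(
--         [
--             (x, cards[x])
--             for x in cards
--         ], key=lambda x: x[1])
--     most_common_card = "J"
--     most_common_card = card_count_sorted[-1][0]
--     if most_common_card == "J":
--         if len(card_count_sorted) > 1: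
--             most_common_card = card_count_sorted[-2][0]
--         else:
--             most_common_card = "A"
--
--     jokers_replaced = ""
--     for card in hand:
--         if card != "J":
--             jokers_replaced += card
--         else:
--             jokers_replaced += most_common_card
--     return jokers_replaced
-- ===== SOURCE B (Python) =====
-- def translate_jokers(hand):
--     counts = {}
--     for card in hand:
--         counts[card] = counts.get(card, 0) + 1
--     best = None
--     best_n = 0
--     for card, n in counts.items():
--         if n >= best_n:
--             best, best_n = card, n
--     if best == "J":
--         if len(counts) == 1:
--             best = "A"
--         else:
--             best = None
--             best_n = 0
--             for card, n in counts.items():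
--                 if card != "J" and n >= best_n:
--                     best, best_n = card, n
--     return "".join(best if c == "J" else c for c in hand)
-- ===== Notes on version B (the rewrite author's own statement) =====
-- stated objective: alternative
-- what changed: B replaces A's build-pairs + stable ascending sort + negative indexing (last and second-to-last element) by two direct linear scans over the count dict using a greater-or-equal tie rule (the last-inserted maximum wins, matching the stable sort), the second scan skipping the joker key; the output is built by a map instead of string concatenation in a loop.
import Mathlib
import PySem

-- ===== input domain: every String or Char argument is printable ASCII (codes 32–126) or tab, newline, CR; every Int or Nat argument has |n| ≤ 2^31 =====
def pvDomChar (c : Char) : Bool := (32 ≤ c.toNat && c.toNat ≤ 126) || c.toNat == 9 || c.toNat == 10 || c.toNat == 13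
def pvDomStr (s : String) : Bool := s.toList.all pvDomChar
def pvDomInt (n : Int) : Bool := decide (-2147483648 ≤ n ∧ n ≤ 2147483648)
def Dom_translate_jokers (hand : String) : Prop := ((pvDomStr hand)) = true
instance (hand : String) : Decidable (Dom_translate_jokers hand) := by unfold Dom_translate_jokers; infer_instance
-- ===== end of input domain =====

-- B replaces A's sort+negative-indexing by two linear '>='-scans of the count dict; same value on every
-- non-empty hand (A raises IndexError on "").

-- ===== PORT A =====
def get_card_count (hand : String) : PySem.Dict Char Int :=
  hand.toList.foldl
    (fun hand_dict card =>
      let hand_dict := if hand_dict.contains card then hand_dict else hand_dict.insert card 0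
      hand_dict.insert card (hand_dict.getD card 0 + 1))
    PySem.Dict.empty

def translate_jokers (hand : String) : String :=
  let cards := get_card_count hand
  let card_count_sorted :=
    PySem.List.sorted (cards.keys.map (fun x => (x, cards.getD x 0))) (fun x => x.2) false
  let most_common_card := (PySem.List.pyGetD card_count_sorted (-1) ('J', 0)).1
  let most_common_card :=
    if most_common_card = 'J' then
      if 1 < card_count_sorted.length then
        (PySem.List.pyGetD card_count_sorted (-2) ('J', 0)).1
      else 'A'
    else most_common_card
  String.mk (hand.toList.foldl
    (fun jokers_replaced card =>
      if card ≠ 'J' then jokers_replaced ++ [card] else jokers_replaced ++ [most_common_card]) [])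

-- ===== PORT B =====
def translate_jokers_alt (hand : String) : String :=
  let counts : PySem.Dict Char Int := hand.toList.foldl
    (fun d card => d.insert card (d.getD card 0 + 1)) PySem.Dict.empty
  let b0 := counts.items.foldl (fun st p => if p.2 ≥ st.2 then p else st) (('A', 0) : Char × Int)
  let best :=
    if b0.1 = 'J' then
      if counts.size = 1 then 'A'
      else (counts.items.foldl
        (fun st p => if p.1 ≠ 'J' ∧ p.2 ≥ st.2 then p else st) (('A', 0) : Char × Int)).1
    else b0.1
  String.mk (hand.toList.map (fun c => if c = 'J' then best else c))

-- ===== PRECONDITION & SPEC =====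
-- Pre_ excludes only the empty hand, on which A raises IndexError (card_count_sorted[-1] of an empty list).
def Pre_translate_jokers (hand : String) : Prop := hand ≠ ""
instance (hand : String) : Decidable (Pre_translate_jokers hand) := by unfold Pre_translate_jokers; infer_instance
def pvWitness_translate_jokers : String := "AAJJK"

def Spec_translate_jokers (hand : String) (out : String) : Prop := out = translate_jokers_alt hand
instance (hand : String) (out : String) : Decidable (Spec_translate_jokers hand out) := by unfold Spec_translate_jokers; infer_instance

-- ===== CLAIM (what is proved, stated in full; the proofs are below) =====
def Claim_equal_translate_jokers : Prop := ∀ (hand : String), Dom_translate_jokers hand → Pre_translate_jokers hand → Spec_translate_jokers hand (translate_jokers hand)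

-- ===== LEMMAS AND PROOFS =====

-- abbreviations used only by the proofs
def pvS (l : List (Char × Int)) : List (Char × Int) := PySem.List.sorted l (fun x => x.2) false
def pvStep (st p : Char × Int) : Char × Int := if p.2 ≥ st.2 then p else st

-- in a ≤-sorted list every key is ≤ the last key
theorem pv_pairwise_le_getLast (s : List (Char × Int))
    (hp : s.Pairwise (fun a b => a.2 ≤ b.2)) (h : s ≠ []) :
    ∀ y ∈ s, y.2 ≤ (s.getLast h).2 := by
  induction s with
  | nil => simp at h
  | cons a t ih =>
    rcases List.pairwise_cons.1 hp with ⟨ha, ht⟩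
    intro y hy
    cases t with
    | nil => simp at hy; simp [hy]
    | cons b t' =>
      rw [List.getLast_cons (by simp)]
      rcases List.mem_cons.1 hy with rfl | hy'
      · exact le_trans (ha _ (List.getLast_mem (by simp)))
          (ih ht (by simp) _ (List.getLast_mem (by simp)))
      · exact ih ht (by simp) _ hy'

-- getLast? of a cons with nonempty tail
theorem pv_getLast?_cons_of_ne_nil {α : Type} {y : α} {ys : List α} (h : ys ≠ []) :
    (y :: ys).getLast? = ys.getLast? := by
  cases ys with
  | nil => simp at h
  | cons z zs => exact List.getLast?_cons_cons

-- inserting an element that is 'before' the last element leaves the last element unchanged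
theorem pv_insertBy_getLast?_of_before (before : Char × Int → Char × Int → Bool)
    (x : Char × Int) (s : List (Char × Int)) (h : s ≠ [])
    (hb : before x (s.getLast h) = true) :
    (PySem.List.insertBy before x s).getLast? = s.getLast? := by
  induction s with
  | nil => simp at h
  | cons y ys ih =>
    cases ys with
    | nil =>
      simp [List.getLast] at hb
      simp [PySem.List.insertBy, hb]
    | cons z zs =>
      rw [List.getLast_cons (by simp)] at hb
      have hrec := ih (by simp) hb
      have hne2 : PySem.List.insertBy before x (z :: zs) ≠ [] := by
        cases hq : PySem.List.insertBy before x (z :: zs) with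
        | nil =>
          have hx : (x : Char × Int) ∈ PySem.List.insertBy before x (z :: zs) :=
            (PySem.List.mem_insertBy _ _ _ _).2 (Or.inl rfl)
          rw [hq] at hx; simp at hx
        | cons _ _ => simp
      by_cases hxy : before x y = true
      · simp [PySem.List.insertBy, hxy]
      · rw [show PySem.List.insertBy before x (y :: z :: zs)
            = if before x y = true then x :: y :: z :: zs
              else y :: PySem.List.insertBy before x (z :: zs) from rfl]
        rw [if_neg hxy, pv_getLast?_cons_of_ne_nil hne2, hrec, List.getLast?_cons_cons]

-- inserting before a final element distributes over the append
theorem pv_insertBy_append_singleton (before : Char × Int → Char × Int → Bool)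
    (x m : Char × Int) (t : List (Char × Int)) (hb : before x m = true) :
    PySem.List.insertBy before x (t ++ [m]) = PySem.List.insertBy before x t ++ [m] := by
  induction t with
  | nil => simp [PySem.List.insertBy, hb]
  | cons y t' ih =>
    by_cases hxy : before x y = true
    · simp [PySem.List.insertBy, hxy]
    · simp [PySem.List.insertBy, hxy, ih]

-- sorted of an appended element = insert into sorted
theorem pv_sorted_append (l : List (Char × Int)) (x : Char × Int) :
    pvS (l ++ [x]) =
      PySem.List.insertBy (fun a b => decide (a.2 < b.2)) x (pvS l) := by
  unfold pvS
  rw [PySem.List.sorted_eq_foldl_insertBy, PySem.List.sorted_eq_foldl_insertBy,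
    List.foldl_append]
  rfl

-- the '>='-scan computes the last element of the stable ascending sort
theorem pv_foldl_step_eq_getLastD (l : List (Char × Int)) (b : Char × Int)
    (hb : ∀ p ∈ l, b.2 ≤ p.2) :
    l.foldl pvStep b = (pvS l).getLastD b := by
  induction l using List.reverseRecOn with
  | nil => simp [pvS, PySem.List.sorted]
  | append_singleton l x ih =>
    rw [List.foldl_append, List.foldl_cons, List.foldl_nil, pv_sorted_append]
    have hb' : ∀ p ∈ l, b.2 ≤ p.2 := fun p hp => hb p (by simp [hp])
    rw [ih hb']
    rcases eq_or_ne (pvS l) [] with hnil | hne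
    · have hbx : b.2 ≤ x.2 := hb x (by simp)
      have hst : pvStep b x = x := by simp [pvStep]; omega
      simp [hnil, PySem.List.insertBy, hst]
    · have hlast : (pvS l).getLastD b = (pvS l).getLast hne := by
        rw [List.getLastD_eq_getLast?, List.getLast?_eq_some_getLast hne]; rfl
      have hp : (pvS l).Pairwise (fun a b => a.2 ≤ b.2) := PySem.List.sorted_pairwise l _
      by_cases hxm : x.2 ≥ ((pvS l).getLast hne).2
      · have hall : ∀ y ∈ pvS l, (fun a b => decide (a.2 < b.2)) x y = false := by
          intro y hy
          have := pv_pairwise_le_getLast (pvS l) hp hne y hy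
          simp only [decide_eq_false_iff_not, not_lt]
          omega
        rw [PySem.List.insertBy_of_forall_not_before _ _ _ hall]
        rw [List.getLastD_concat, hlast]
        simp only [pvStep]
        rw [if_pos hxm]
      · have hbt : (fun a b => decide ((a : Char × Int).2 < b.2)) x ((pvS l).getLast hne) = true := by
          simp only [decide_eq_true_eq]; omega
        have hkeep := pv_insertBy_getLast?_of_before (fun a b => decide (a.2 < b.2)) x (pvS l) hne hbt
        conv_rhs => rw [List.getLastD_eq_getLast?, hkeep]
        rw [List.getLast?_eq_some_getLast hne]
        simp only [Option.getD_some, pvStep]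
        rw [hlast, if_neg hxm]

-- if the last element of the sort is the unique 'J' entry, the sort splits as (sort of the rest) ++ [that entry]
theorem pv_sorted_split_J (l : List (Char × Int)) (e : Char × Int)
    (hnd : (l.map Prod.fst).Nodup)
    (hlast : (pvS l).getLast? = some e) (hJ : e.1 = 'J') :
    pvS l = pvS (l.filter (fun p => decide (p.1 ≠ 'J'))) ++ [e] := by
  induction l using List.reverseRecOn generalizing e with
  | nil => simp [pvS, PySem.List.sorted] at hlast
  | append_singleton l x ih =>
    have hndl : (l.map Prod.fst).Nodup := by
      rw [List.map_append] at hnd; exact (List.nodup_append.1 hnd).1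
    have hxnotin : ∀ p ∈ l, p.1 ≠ x.1 := by
      intro p hp hpe
      rw [List.map_append, List.nodup_append] at hnd
      exact hnd.2.2 p.1 (List.mem_map.2 ⟨p, hp, rfl⟩) x.1 (by simp) hpe
    rw [pv_sorted_append] at hlast
    rw [pv_sorted_append]
    rcases eq_or_ne (pvS l) [] with hnil | hne
    · have hl : l = [] := (PySem.List.sorted_eq_nil_iff l _ _).1 hnil
      subst hl
      rw [hnil] at hlast ⊢
      have hxe : x = e := by
        simpa [PySem.List.insertBy] using hlast
      subst hxe
      simp [PySem.List.insertBy, pvS, PySem.List.sorted, hJ]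
    · have hp : (pvS l).Pairwise (fun a b => a.2 ≤ b.2) := PySem.List.sorted_pairwise l _
      set m := (pvS l).getLast hne with hm
      by_cases hxm : x.2 ≥ m.2
      · -- x goes to the end, so e = x
        have hall : ∀ y ∈ pvS l, (fun a b => decide (a.2 < b.2)) x y = false := by
          intro y hy
          have hle := pv_pairwise_le_getLast (pvS l) hp hne y hy
          rw [← hm] at hle
          simp only [decide_eq_false_iff_not, not_lt]
          omega
        rw [PySem.List.insertBy_of_forall_not_before _ _ _ hall] at hlast ⊢
        have hxe : x = e := by simpa using hlast
        subst hxe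
        have hfl : l.filter (fun p => decide (p.1 ≠ 'J')) = l := by
          apply List.filter_eq_self.2
          intro p hp'
          have := hxnotin p hp'
          simp only [decide_eq_true_eq]
          rw [hJ] at this; exact this
        rw [List.filter_append, hfl]
        simp [hJ]
      · -- x is inserted strictly before the last element, so e = m
        have hbt : (fun a b => decide ((a : Char × Int).2 < b.2)) x m = true := by
          simp only [decide_eq_true_eq]; omega
        have hkeep := pv_insertBy_getLast?_of_before (fun a b => decide (a.2 < b.2)) x (pvS l) hne hbt
        rw [hkeep, List.getLast?_eq_some_getLast hne] at hlast
        have hme : m = e := by simpa [hm] using hlast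
        have hxJ : x.1 ≠ 'J' := by
          intro hxJ
          have hmem : e ∈ l := by
            rw [← hme]
            exact (PySem.List.mem_sorted l _ _ m).1 (List.getLast_mem hne)
          exact hxnotin e hmem (by rw [hJ, hxJ])
        have hIH := ih e hndl (by rw [List.getLast?_eq_some_getLast hne, ← hm, hme]) hJ
        rw [List.filter_append]
        have hfx : [x].filter (fun p => decide (p.1 ≠ 'J')) = [x] := by simp [hxJ]
        rw [hfx, pv_sorted_append, hIH, pv_insertBy_append_singleton _ _ _ _ (by rw [← hme]; exact hbt)]

-- A's two-step dict build equals B's one-step build, i.e. Counter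
theorem pv_get_card_count_eq (hand : String) :
    get_card_count hand = PySem.Dict.counter hand.toList := by
  unfold get_card_count
  dsimp only
  refine Eq.trans
    (PySem.List.foldl_congr_mem hand.toList _
      (fun d card => d.insert card (d.getD card 0 + 1)) PySem.Dict.empty
      (by
        intro d c _
        by_cases hc : d.contains c = true
        · rw [if_pos hc]
        · rw [if_neg hc]
          show (d.insert c 0).insert c ((d.insert c 0).getD c 0 + 1)
              = d.insert c (d.getD c 0 + 1)
          rw [PySem.Dict.insert_insert_self, PySem.Dict.getD_insert_self,
            PySem.Dict.getD_of_not_contains d (0 : Int) (by simpa using hc)]))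
    (PySem.Dict.foldl_insert_getD_add_one_eq_counter hand.toList)

-- the output-building loop is the map
theorem pv_out (cs : List Char) (m : Char) :
    cs.foldl (fun acc c => if c ≠ 'J' then acc ++ [c] else acc ++ [m]) []
      = cs.map (fun c => if c = 'J' then m else c) := by
  refine Eq.trans
    (PySem.List.foldl_congr_mem cs _ (fun acc c => acc ++ [if c = 'J' then m else c]) []
      (by intro acc c _; by_cases h : c = 'J' <;> simp [h]))
    (by simpa using PySem.List.foldl_append_singleton_eq_map (fun c => if c = 'J' then m else c) cs [])

theorem translate_jokers_spec : Claim_equal_translate_jokers := by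
  intro hand _ hpre
  have hcs : hand.toList ≠ [] := by
    intro hn; apply hpre
    have := congrArg String.ofList hn
    simpa using this
  unfold Spec_translate_jokers translate_jokers translate_jokers_alt
  dsimp only
  rw [pv_get_card_count_eq]
  rw [PySem.Dict.foldl_insert_getD_add_one_eq_counter]
  have hnd : (PySem.Dict.counter hand.toList).keys.Nodup :=
    PySem.Dict.nodup_keys_counter hand.toList
  rw [← PySem.Dict.items_eq_map_keys (PySem.Dict.counter hand.toList) hnd 0]
  -- abbreviations
  have hlne : (PySem.Dict.counter hand.toList).items ≠ [] := by
    rcases List.exists_mem_of_ne_nil hand.toList hcs with ⟨c, hc⟩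
    refine List.ne_nil_of_mem (a := (c, (hand.toList.count c : Int))) ?_
    rw [PySem.Dict.items_counter]
    exact List.mem_map.2 ⟨c, (PySem.Set.mem_ofList _ _).2 hc, rfl⟩
  have hpos : ∀ p ∈ (PySem.Dict.counter hand.toList).items, (('A', (0 : Int)) : Char × Int).2 ≤ p.2 := by
    intro p hp
    rw [PySem.Dict.items_counter] at hp
    rcases List.mem_map.1 hp with ⟨k, _, rfl⟩
    simp
  have hsne : pvS (PySem.Dict.counter hand.toList).items ≠ [] := by
    intro hn
    exact hlne ((PySem.List.sorted_eq_nil_iff _ _ _).1 hn)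
  have hfold : List.foldl (fun st p => if p.2 ≥ st.2 then p else st) (('A', 0) : Char × Int)
      (PySem.Dict.counter hand.toList).items
      = (pvS (PySem.Dict.counter hand.toList).items).getLast hsne := by
    refine Eq.trans (pv_foldl_step_eq_getLastD _ _ hpos) ?_
    rw [List.getLastD_eq_getLast?, List.getLast?_eq_some_getLast hsne]; rfl
  rw [show ∀ l : List (Char × Int), PySem.List.sorted l (fun x => x.2) false = pvS l from fun l => rfl]
  rw [hfold]
  rw [PySem.List.pyGetD_neg_one _ _ hsne]
  rw [pv_out]
  congr 1
  apply List.map_congr_left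
  intro c _
  by_cases hcJ : c = 'J'
  · rw [if_pos hcJ, if_pos hcJ]
    -- now both sides are the chosen replacement card
    by_cases hJ : ((pvS (PySem.Dict.counter hand.toList).items).getLast hsne).1 = 'J'
    · rw [if_pos hJ, if_pos hJ]
      have hlen : (pvS (PySem.Dict.counter hand.toList).items).length
          = (PySem.Dict.counter hand.toList).items.length := PySem.List.length_sorted _ _ _
      have hsz : (PySem.Dict.counter hand.toList).size
          = (PySem.Dict.counter hand.toList).items.length := rfl
      have h1le : 1 ≤ (PySem.Dict.counter hand.toList).items.length :=
        List.length_pos_of_ne_nil hlne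
      by_cases hone : (PySem.Dict.counter hand.toList).items.length = 1
      · rw [if_neg (by omega), if_pos (by omega)]
      · rw [if_pos (by omega), if_neg (by omega)]
        -- the interesting case: sorted[-2] = '>='-scan over the non-J entries
        have hlast : (pvS (PySem.Dict.counter hand.toList).items).getLast? =
            some ((pvS (PySem.Dict.counter hand.toList).items).getLast hsne) :=
          List.getLast?_eq_some_getLast hsne
        have hsplit := pv_sorted_split_J (PySem.Dict.counter hand.toList).items
          ((pvS (PySem.Dict.counter hand.toList).items).getLast hsne) hnd hlast hJ
        set T := pvS ((PySem.Dict.counter hand.toList).items.filter (fun p => decide (p.1 ≠ 'J'))) with hT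
        have hTlen : (pvS (PySem.Dict.counter hand.toList).items).length = T.length + 1 := by
          rw [hsplit]; simp
        have hTne : T ≠ [] := by
          intro hn
          rw [hn] at hTlen
          simp at hTlen
          omega
        -- A side
        rw [PySem.List.pyGetD_neg_ofNat _ 2 _ (by omega) (by omega)]
        have hidx2 : (pvS (PySem.Dict.counter hand.toList).items).length - 2 = T.length - 1 := by
          omega
        have hAside : (pvS (PySem.Dict.counter hand.toList).items)[(pvS (PySem.Dict.counter hand.toList).items).length - 2]'(by omega)
            = T.getLast hTne := by
          simp only [hidx2]
          rw [List.getElem_of_eq hsplit, List.getElem_append_left (by omega),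
            List.getLast_eq_getElem]
        rw [hAside]
        -- B side
        have hstep2 : List.foldl (fun st p => if p.1 ≠ 'J' ∧ p.2 ≥ st.2 then p else st)
            (('A', 0) : Char × Int) (PySem.Dict.counter hand.toList).items
            = List.foldl pvStep (('A', 0) : Char × Int)
                ((PySem.Dict.counter hand.toList).items.filter (fun p => decide (p.1 ≠ 'J'))) := by
          refine Eq.trans
            (PySem.List.foldl_congr_mem _ _
              (fun st p => if p.1 ≠ 'J' then pvStep st p else st) _
              (by
                intro st p _
                by_cases h1 : p.1 = 'J' <;> by_cases h2 : p.2 ≥ st.2 <;>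
                  simp [pvStep, h1, h2]))
            (PySem.List.foldl_ite_eq_foldl_filter (fun p => p.1 ≠ 'J') pvStep _ _)
        rw [hstep2]
        have hposf : ∀ p ∈ (PySem.Dict.counter hand.toList).items.filter (fun p => decide (p.1 ≠ 'J')),
            (('A', (0 : Int)) : Char × Int).2 ≤ p.2 := by
          intro p hp
          exact hpos p (List.mem_of_mem_filter hp)
        rw [pv_foldl_step_eq_getLastD _ _ hposf, ← hT,
          List.getLastD_eq_getLast?, List.getLast?_eq_some_getLast hTne]
        rfl
    · rw [if_neg hJ, if_neg hJ]
  · rw [if_neg hcJ, if_neg hcJ]
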